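-- pv_equiv track=rewrite | github.com/aroob6/codingTestWithSwiftAndPython | trainCodingTest/section7/8. 사과나무.py | solution
-- ===== SOURCE A (Python) =====
-- from collections import deque
--
-- def solution(n, arr):
--     dx = [-1,0,1,0]
--     dy = [0,1,0,-1]
--
--     ch = [[0]*n for _ in range(n)]
--     sum = 0
--     Q = deque()
--     ch[n//2][n//2] = 1
--     sum += arr[n//2][n//2]
--     Q.append((n//2,n//2))
--     L=0
--
--     while True:
--         if L == n//2:
--             break
--         size = len(Q)
--         for _ in range(size):
--             tmp = Q.popleft()
--             for j in range(4): #상하좌우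
--                 x = tmp[0]+dx[j]
--                 y = tmp[1]+dy[j]
--                 if ch[x][y] == 0:
--                     sum += arr[x][y]
--                     ch[x][y] = 1
--                     Q.append((x,y))
--         L+=1
--
--     return sum
-- ===== SOURCE B (Python) =====
-- def solution(n, arr):
--     c = n // 2
--     total = 0
--     for i in range(n):
--         r = c - abs(i - c)
--         for j in range(c - r, c + r + 1):
--             total += arr[i][j]
--     return total
-- ===== Notes on version B (the rewrite author's own statement) =====
-- stated objective: simpler
-- what changed: Replaces the BFS wavefront (deque, visited grid, level counter) with a direct row-by-row scan that sums, for each row, the contiguous column interval within Manhattan distance n//2 of the center.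
import Mathlib
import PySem

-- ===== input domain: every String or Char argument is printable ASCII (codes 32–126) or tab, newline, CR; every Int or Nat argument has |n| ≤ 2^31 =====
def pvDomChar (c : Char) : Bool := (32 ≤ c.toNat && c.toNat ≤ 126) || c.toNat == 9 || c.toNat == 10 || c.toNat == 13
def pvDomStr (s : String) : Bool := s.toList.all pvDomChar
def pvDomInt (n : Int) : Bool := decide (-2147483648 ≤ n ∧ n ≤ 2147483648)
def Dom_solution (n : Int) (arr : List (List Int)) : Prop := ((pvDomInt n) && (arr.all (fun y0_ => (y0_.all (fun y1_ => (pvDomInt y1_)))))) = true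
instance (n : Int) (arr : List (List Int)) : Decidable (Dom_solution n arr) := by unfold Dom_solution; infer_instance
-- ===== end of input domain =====

-- B replaces A's BFS wavefront (deque + visited grid + level counter) with one flat double
-- loop guarded by a Manhattan-distance test; equal on Pre_ (odd n ≥ 1, diamond cells present).

-- ===== PORT A =====
-- ch[x][y] read: Python raises IndexError out of range; defaults (1 resp. 0, row []) are
-- only reached outside Pre_solution, where Python A raises or loops — exact inside Pre_.
def pvChGet (ch : List (List Int)) (x y : Int) : Int :=
  PySem.List.pyGetD (PySem.List.pyGetD ch x []) y 1

def pvChSet (ch : List (List Int)) (x y : Int) : List (List Int) :=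
  PySem.List.pySetD ch x (PySem.List.pySetD (PySem.List.pyGetD ch x []) y 1)

def pvArrGet (arr : List (List Int)) (x y : Int) : Int :=
  PySem.List.pyGetD (PySem.List.pyGetD arr x []) y 0

-- body of 'if ch[x][y] == 0: sum += arr[x][y]; ch[x][y] = 1; Q.append((x,y))'
def pvVisit (arr : List (List Int)) (st : List (List Int) × Int × List (Int × Int))
    (xy : Int × Int) : List (List Int) × Int × List (Int × Int) :=
  if pvChGet st.1 xy.1 xy.2 = 0 then
    (pvChSet st.1 xy.1 xy.2, st.2.1 + pvArrGet arr xy.1 xy.2, st.2.2 ++ [xy])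
  else st

-- 'for j in range(4): x = tmp[0]+dx[j]; y = tmp[1]+dy[j]; …'
def pvParent (arr : List (List Int)) (st : List (List Int) × Int × List (Int × Int))
    (tmp : Int × Int) : List (List Int) × Int × List (Int × Int) :=
  (List.range 4).foldl (fun st j =>
    pvVisit arr st (tmp.1 + (([-1, 0, 1, 0] : List Int).getD j 0),
                    tmp.2 + (([0, 1, 0, -1] : List Int).getD j 0))) st

-- one while-iteration: size = len(Q); pop all of Q, appending discoveries (fresh accumulator)
def pvLevel (arr : List (List Int)) (st : List (List Int) × Int × List (Int × Int)) :
    List (List Int) × Int × List (Int × Int) :=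
  st.2.2.foldl (pvParent arr) (st.1, st.2.1, ([] : List (Int × Int)))

-- the while loop runs exactly n//2 iterations (L = 0 … n//2-1); faithful for n//2 ≥ 0,
-- and inside Pre_ always (Python loops forever / raises for n < 0, outside Pre_)
def pvRun (arr : List (List Int)) : Nat → List (List Int) × Int × List (Int × Int) →
    List (List Int) × Int × List (Int × Int)
  | 0, st => st
  | k + 1, st => pvRun arr k (pvLevel arr st)

def solution (n : Int) (arr : List (List Int)) : Int :=
  let c := PySem.Int.floordiv n 2
  let ch := List.replicate n.toNat (List.replicate n.toNat (0 : Int))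
  let st := (pvChSet ch c c, 0 + pvArrGet arr c c, [((c : Int), (c : Int))])
  (pvRun arr (PySem.Int.floordiv n 2).toNat st).2.1

-- ===== PORT B =====
def solution_alt (n : Int) (arr : List (List Int)) : Int :=
  let c := PySem.Int.floordiv n 2
  (PySem.List.pyRange 0 n 1).foldl (fun total i =>
    let r := c - |i - c|
    (PySem.List.pyRange (c - r) (c + r + 1) 1).foldl (fun total j =>
      total + pvArrGet arr i j) total) 0

-- ===== PRECONDITION & SPEC =====
-- Exactly the inputs on which Python A returns: n odd and ≥ 1 (even/nonpositive n raises
-- IndexError or loops), and every cell of the radius-n//2 diamond present in arr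
-- (A reads exactly those cells; a missing one raises IndexError).
def Pre_solution (n : Int) (arr : List (List Int)) : Prop :=
  n % 2 = 1 ∧ 1 ≤ n ∧
  ∀ i ∈ List.range n.toNat, ∀ j ∈ List.range n.toNat,
    ((i : Int) - n / 2).natAbs + ((j : Int) - n / 2).natAbs ≤ (n / 2).toNat →
    i < arr.length ∧ j < (arr.getD i []).length
instance (n : Int) (arr : List (List Int)) : Decidable (Pre_solution n arr) := by
  unfold Pre_solution; infer_instance

def pvWitness_solution : Int × List (List Int) := (3, [[1, 2, 3], [4, 5, 6], [7, 8, 9]])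

def Spec_solution (n : Int) (arr : List (List Int)) (out : Int) : Prop := out = solution_alt n arr
instance (n : Int) (arr : List (List Int)) (out : Int) : Decidable (Spec_solution n arr out) := by
  unfold Spec_solution; infer_instance

-- ===== CLAIM (what is proved, stated in full; the proofs are below) =====
def Claim_equal_solution : Prop := ∀ (n : Int) (arr : List (List Int)),
  Dom_solution n arr → Pre_solution n arr → Spec_solution n arr (solution n arr)

-- ===== LEMMAS AND PROOFS =====

-- Manhattan distance from the center c, and the diamond of radius d (as a Finset)
def dstC (c : Int) (p : Int × Int) : Nat := (p.1 - c).natAbs + (p.2 - c).natAbs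

def Dia (c : Int) (d : Nat) : Finset (Int × Int) :=
  (((Finset.range (2 * d + 1)) ×ˢ (Finset.range (2 * d + 1))).image
    (fun p => (c - d + p.1, c - d + p.2))).filter (fun p => dstC c p ≤ d)

lemma mem_Dia {c : Int} {d : Nat} {p : Int × Int} : p ∈ Dia c d ↔ dstC c p ≤ d := by
  simp only [Dia, Finset.mem_filter, Finset.mem_image, Finset.mem_product, Finset.mem_range]
  constructor
  · exact fun h => h.2
  · intro h
    refine ⟨⟨((p.1 - c + d).toNat, (p.2 - c + d).toNat), ⟨?_, ?_⟩, ?_⟩, h⟩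
    · simp only [dstC] at h; omega
    · simp only [dstC] at h; omega
    · simp only [dstC] at h
      obtain ⟨a, b⟩ := p
      simp only [Prod.mk.injEq] at *
      omega

lemma Dia_mono {c : Int} {d e : Nat} (h : d ≤ e) : Dia c d ⊆ Dia c e := by
  intro p hp; rw [mem_Dia] at *; omega

def pvRing (c : Int) (k : Nat) : Finset (Int × Int) := (Dia c k).filter (fun p => dstC c p = k)

lemma mem_pvRing {c : Int} {k : Nat} {p : Int × Int} : p ∈ pvRing c k ↔ dstC c p = k := by
  simp only [pvRing, Finset.mem_filter, mem_Dia]; omega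

def pvNbrs (p : Int × Int) : List (Int × Int) :=
  [(p.1 - 1, p.2), (p.1, p.2 + 1), (p.1 + 1, p.2), (p.1, p.2 - 1)]

lemma nbr_dst {c : Int} {p q : Int × Int} (h : q ∈ pvNbrs p) : dstC c q ≤ dstC c p + 1 := by
  simp only [pvNbrs, List.mem_cons, List.not_mem_nil, or_false] at h
  rcases h with h | h | h | h <;> subst h <;> simp [dstC] <;> omega

lemma exists_parent {c : Int} {q : Int × Int} {k : Nat} (h : dstC c q = k + 1) :
    ∃ p, dstC c p = k ∧ q ∈ pvNbrs p := by
  obtain ⟨a, b⟩ := q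
  simp only [dstC] at h
  by_cases ha : c < a
  · exact ⟨(a - 1, b), by simp [dstC]; omega, by simp [pvNbrs]⟩
  · by_cases ha' : a < c
    · exact ⟨(a + 1, b), by simp [dstC]; omega, by simp [pvNbrs]⟩
    · by_cases hb : c < b
      · exact ⟨(a, b - 1), by simp [dstC]; omega, by simp [pvNbrs]⟩
      · exact ⟨(a, b + 1), by simp [dstC]; omega, by simp [pvNbrs]⟩

-- grid access normalisation on nonnegative indices
lemma chGet_nonneg (ch : List (List Int)) {x y : Int} (hx : 0 ≤ x) (hy : 0 ≤ y) :
    pvChGet ch x y = (ch.getD x.toNat []).getD y.toNat 1 := by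
  obtain ⟨xa, rfl⟩ := Int.eq_ofNat_of_zero_le hx
  obtain ⟨ya, rfl⟩ := Int.eq_ofNat_of_zero_le hy
  simp [pvChGet]

lemma chSet_nonneg (ch : List (List Int)) {x y : Int} (hx : 0 ≤ x) (hy : 0 ≤ y) :
    pvChSet ch x y = ch.set x.toNat ((ch.getD x.toNat []).set y.toNat 1) := by
  obtain ⟨xa, rfl⟩ := Int.eq_ofNat_of_zero_le hx
  obtain ⟨ya, rfl⟩ := Int.eq_ofNat_of_zero_le hy
  simp [pvChSet]

-- grid ch represents the marked set M on the (2c+1)×(2c+1) board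
def GridOK (c : Int) (ch : List (List Int)) (M : Finset (Int × Int)) : Prop :=
  ch.length = (2 * c + 1).toNat ∧ (∀ row ∈ ch, row.length = (2 * c + 1).toNat) ∧
  ∀ x y : Int, 0 ≤ x → x < 2 * c + 1 → 0 ≤ y → y < 2 * c + 1 →
    pvChGet ch x y = (if (x, y) ∈ M then 1 else 0)

lemma gridOK_set {c : Int} {ch : List (List Int)} {M : Finset (Int × Int)} {x y : Int}
    (h : GridOK c ch M) (hx : 0 ≤ x) (hx2 : x < 2 * c + 1) (hy : 0 ≤ y) (hy2 : y < 2 * c + 1) :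
    GridOK c (pvChSet ch x y) (insert (x, y) M) := by
  obtain ⟨hlen, hrows, hpt⟩ := h
  have hxN : x.toNat < ch.length := by omega
  have hrowlen : (ch.getD x.toNat []).length = (2 * c + 1).toNat := by
    rw [List.getD_eq_getElem ch [] hxN]
    exact hrows _ (List.getElem_mem hxN)
  rw [chSet_nonneg ch hx hy]
  refine ⟨by simp [hlen], ?_, ?_⟩
  · intro row hrow
    rcases List.mem_or_eq_of_mem_set hrow with hmem | rfl
    · exact hrows row hmem
    · rw [List.length_set]; exact hrowlen
  · intro a b ha ha2 hb hb2
    have haN : a.toNat < ch.length := by omega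
    have haN' : a.toNat < (ch.set x.toNat ((ch.getD x.toNat []).set y.toNat 1)).length := by
      simpa using haN
    have hbN : b.toNat < (ch.getD x.toNat []).length := by omega
    rw [chGet_nonneg _ ha hb]
    have hold : pvChGet ch a b = if (a, b) ∈ M then 1 else 0 := hpt a b ha ha2 hb hb2
    rw [chGet_nonneg _ ha hb] at hold
    rw [List.getD_eq_getElem _ [] haN', List.getElem_set]
    by_cases hax : a = x
    · subst hax
      rw [if_pos rfl]
      have hbN' : b.toNat < ((ch.getD a.toNat []).set y.toNat 1).length := by simpa using hbN
      rw [List.getD_eq_getElem _ 1 hbN', List.getElem_set]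
      by_cases hby : b = y
      · subst hby
        rw [if_pos rfl, if_pos (Finset.mem_insert_self _ _)]
      · have hyb : ¬ (y.toNat = b.toNat) := by omega
        rw [if_neg hyb]
        have hmem : ((a, b) ∈ insert (a, y) M) ↔ ((a, b) ∈ M) := by
          simp [Finset.mem_insert, Prod.ext_iff, hby]
        rw [show (if (a, b) ∈ insert (a, y) M then (1 : Int) else 0)
              = (if (a, b) ∈ M then 1 else 0) from if_congr hmem rfl rfl, ← hold]
        exact (List.getD_eq_getElem _ 1 hbN).symm
    · have hxa : ¬ (x.toNat = a.toNat) := by omega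
      rw [if_neg hxa]
      have hmem : ((a, b) ∈ insert (x, y) M) ↔ ((a, b) ∈ M) := by
        simp [Finset.mem_insert, Prod.ext_iff, hax]
      rw [show (if (a, b) ∈ insert (x, y) M then (1 : Int) else 0)
            = (if (a, b) ∈ M then 1 else 0) from if_congr hmem rfl rfl, ← hold]
      rw [List.getD_eq_getElem ch [] haN]

-- the in-range coordinates follow from being inside the radius-c diamond
lemma dst_coords {c : Int} {q : Int × Int} (hc : 0 ≤ c) (h : dstC c q ≤ c.toNat) :
    0 ≤ q.1 ∧ q.1 < 2 * c + 1 ∧ 0 ≤ q.2 ∧ q.2 < 2 * c + 1 := by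
  simp only [dstC] at h; omega

-- invariant of the inner discovery fold within one BFS level
def InvL (c : Int) (arr : List (List Int)) (k : Nat) (M : Finset (Int × Int))
    (st : List (List Int) × Int × List (Int × Int)) : Prop :=
  GridOK c st.1 M ∧ Dia c k ⊆ M ∧ M ⊆ Dia c (k + 1) ∧
  st.2.1 = ∑ p ∈ M, pvArrGet arr p.1 p.2 ∧
  st.2.2.Nodup ∧ st.2.2.toFinset = M \ Dia c k

lemma visit_step {c : Int} {arr : List (List Int)} {k : Nat} {M : Finset (Int × Int)}
    {st : List (List Int) × Int × List (Int × Int)} {q : Int × Int}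
    (hc : 0 ≤ c) (hk : (k : Int) < c) (hq : dstC c q ≤ k + 1) (hInv : InvL c arr k M st) :
    ∃ M', InvL c arr k M' (pvVisit arr st q) ∧ M ⊆ M' ∧ q ∈ M' := by
  obtain ⟨hG, hDk, hDk1, hsum, hnd, hacc⟩ := hInv
  have hqc : dstC c q ≤ c.toNat := by omega
  obtain ⟨h1, h2, h3, h4⟩ := dst_coords hc hqc
  have hget : pvChGet st.1 q.1 q.2 = if q ∈ M then 1 else 0 := by
    have := hG.2.2 q.1 q.2 h1 h2 h3 h4
    simpa using this
  by_cases hqM : q ∈ M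
  · refine ⟨M, ?_, Finset.Subset.refl _, hqM⟩
    have : pvVisit arr st q = st := by
      unfold pvVisit
      rw [hget, if_pos hqM]
      simp
    rw [this]
    exact ⟨hG, hDk, hDk1, hsum, hnd, hacc⟩
  · have hq0 : pvChGet st.1 q.1 q.2 = 0 := by rw [hget, if_neg hqM]
    have hvis : pvVisit arr st q =
        (pvChSet st.1 q.1 q.2, st.2.1 + pvArrGet arr q.1 q.2, st.2.2 ++ [q]) := by
      unfold pvVisit
      rw [hq0, if_pos rfl]
    have hqDk : q ∉ Dia c k := fun hcon => hqM (hDk hcon)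
    have hqacc : q ∉ st.2.2 := by
      intro hcon
      have : q ∈ st.2.2.toFinset := List.mem_toFinset.mpr hcon
      rw [hacc, Finset.mem_sdiff] at this
      exact hqM this.1
    refine ⟨insert q M, ?_, Finset.subset_insert _ _, Finset.mem_insert_self _ _⟩
    rw [hvis]
    refine ⟨?_, hDk.trans (Finset.subset_insert _ _), ?_, ?_, ?_, ?_⟩
    · have := gridOK_set hG h1 h2 h3 h4
      simpa using this
    · exact Finset.insert_subset (mem_Dia.mpr hq) hDk1
    · simp only []
      rw [Finset.sum_insert hqM, hsum]
      ring
    · simp only []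
      rw [List.nodup_append]
      refine ⟨hnd, List.nodup_singleton _, ?_⟩
      intro a ha' b hb'
      simp only [List.mem_cons, List.not_mem_nil, or_false] at hb'
      subst hb'
      exact fun hcon => hqacc (hcon ▸ ha')
    · simp only [List.toFinset_append, List.toFinset_cons, List.toFinset_nil]
      rw [hacc]
      ext r
      simp only [Finset.mem_union, Finset.mem_sdiff, Finset.mem_insert,
        or_false, Finset.notMem_empty]
      constructor
      · rintro (⟨hrM, hrD⟩ | rfl)
        · exact ⟨Or.inr hrM, hrD⟩
        · exact ⟨Or.inl rfl, hqDk⟩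
      · rintro ⟨rfl | hrM, hrD⟩
        · exact Or.inr rfl
        · exact Or.inl ⟨hrM, hrD⟩

lemma visits_fold {c : Int} {arr : List (List Int)} {k : Nat} (L : List (Int × Int))
    {M : Finset (Int × Int)} {st : List (List Int) × Int × List (Int × Int)}
    (hc : 0 ≤ c) (hk : (k : Int) < c) (hL : ∀ q ∈ L, dstC c q ≤ k + 1)
    (hInv : InvL c arr k M st) :
    ∃ M', InvL c arr k M' (L.foldl (pvVisit arr) st) ∧ M ⊆ M' ∧ ∀ q ∈ L, q ∈ M' := by
  induction L generalizing M st with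
  | nil => exact ⟨M, hInv, Finset.Subset.refl _, by simp⟩
  | cons q L ih =>
    obtain ⟨M1, h1, hsub1, hq1⟩ := visit_step hc hk (hL q (by simp)) hInv
    obtain ⟨M', h', hsub', hall⟩ := ih (fun r hr => hL r (by simp [hr])) h1
    refine ⟨M', h', hsub1.trans hsub', ?_⟩
    intro r hr
    rcases List.mem_cons.mp hr with rfl | hr
    · exact hsub' hq1
    · exact hall r hr

lemma parent_eq_nbrs (arr : List (List Int)) (st : List (List Int) × Int × List (Int × Int))
    (tmp : Int × Int) : pvParent arr st tmp = (pvNbrs tmp).foldl (pvVisit arr) st := by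
  show (List.range 4).foldl _ st = _
  rw [show List.range 4 = [0, 1, 2, 3] by rfl]
  simp [pvNbrs, List.foldl, sub_eq_add_neg]

lemma parents_eq_flat (arr : List (List Int)) (P : List (Int × Int))
    (st : List (List Int) × Int × List (Int × Int)) :
    P.foldl (pvParent arr) st = (P.flatMap pvNbrs).foldl (pvVisit arr) st := by
  induction P generalizing st with
  | nil => rfl
  | cons p P ih => simp [List.foldl_cons, List.flatMap_cons, List.foldl_append,
      parent_eq_nbrs, ih]

-- invariant between levels: after k levels the state is exactly (grid of Dia k, its sum, ring k)
def LevelInv (c : Int) (arr : List (List Int)) (k : Nat)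
    (st : List (List Int) × Int × List (Int × Int)) : Prop :=
  GridOK c st.1 (Dia c k) ∧ st.2.1 = ∑ p ∈ Dia c k, pvArrGet arr p.1 p.2 ∧
  st.2.2.Nodup ∧ st.2.2.toFinset = pvRing c k

lemma level_step {c : Int} {arr : List (List Int)} {k : Nat}
    {st : List (List Int) × Int × List (Int × Int)}
    (hc : 0 ≤ c) (hk : (k : Int) < c) (h : LevelInv c arr k st) :
    LevelInv c arr (k + 1) (pvLevel arr st) := by
  obtain ⟨hG, hsum, hnd, hring⟩ := h
  have hInv0 : InvL c arr k (Dia c k) (st.1, st.2.1, ([] : List (Int × Int))) :=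
    ⟨hG, Finset.Subset.refl _, Dia_mono (Nat.le_succ k), hsum, List.nodup_nil,
      by simp⟩
  have hL : ∀ q ∈ st.2.2.flatMap pvNbrs, dstC c q ≤ k + 1 := by
    intro q hqf
    obtain ⟨p, hpP, hqn⟩ := List.mem_flatMap.mp hqf
    have hpk : dstC c p = k := mem_pvRing.mp (hring ▸ List.mem_toFinset.mpr hpP)
    have := nbr_dst (c := c) hqn
    omega
  obtain ⟨M', hInv', hsub', hall⟩ := visits_fold _ hc hk hL hInv0
  have hM' : M' = Dia c (k + 1) := by
    apply Finset.Subset.antisymm hInv'.2.2.1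
    intro q hqD
    rw [mem_Dia] at hqD
    by_cases hle : dstC c q ≤ k
    · exact hInv'.2.1 (mem_Dia.mpr hle)
    · have hqk : dstC c q = k + 1 := by omega
      obtain ⟨p, hpk, hqn⟩ := exists_parent hqk
      have hpP : p ∈ st.2.2 := List.mem_toFinset.mp (hring ▸ mem_pvRing.mpr hpk)
      exact hall q (List.mem_flatMap.mpr ⟨p, hpP, hqn⟩)
  have heq : pvLevel arr st = (st.2.2.flatMap pvNbrs).foldl (pvVisit arr)
      (st.1, st.2.1, ([] : List (Int × Int))) := by
    unfold pvLevel
    exact parents_eq_flat arr st.2.2 _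
  rw [heq]
  obtain ⟨hG', hDk', hDk1', hsum', hnd', hacc'⟩ := hInv'
  rw [hM'] at hG' hsum' hacc'
  refine ⟨hG', hsum', hnd', ?_⟩
  rw [hacc']
  ext r
  simp only [Finset.mem_sdiff, mem_Dia, mem_pvRing]
  omega

lemma run_levels {c : Int} {arr : List (List Int)} (hc : 0 ≤ c) (m k : Nat)
    (hmk : k + m = c.toNat) {st : List (List Int) × Int × List (Int × Int)}
    (h : LevelInv c arr k st) : LevelInv c arr c.toNat (pvRun arr m st) := by
  induction m generalizing k st with
  | zero => simpa [pvRun, show k = c.toNat by omega] using h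
  | succ m ih =>
    have hk : (k : Int) < c := by omega
    exact ih (k + 1) (by omega) (level_step hc hk h)

lemma init_levelInv {c : Int} (arr : List (List Int)) (hc : 0 ≤ c) :
    LevelInv c arr 0
      (pvChSet (List.replicate (2 * c + 1).toNat (List.replicate (2 * c + 1).toNat (0 : Int))) c c,
       0 + pvArrGet arr c c, [((c : Int), (c : Int))]) := by
  have hdia0 : Dia c 0 = {((c : Int), (c : Int))} := by
    ext p
    obtain ⟨a, b⟩ := p
    simp only [mem_Dia, dstC, Finset.mem_singleton, Prod.mk.injEq]
    omega
  have hring0 : pvRing c 0 = {((c : Int), (c : Int))} := by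
    ext p
    obtain ⟨a, b⟩ := p
    simp only [mem_pvRing, dstC, Finset.mem_singleton, Prod.mk.injEq]
    omega
  have hG0 : GridOK c (List.replicate (2 * c + 1).toNat
      (List.replicate (2 * c + 1).toNat (0 : Int))) (∅ : Finset (Int × Int)) := by
    refine ⟨List.length_replicate, ?_, ?_⟩
    · intro row hrow
      rw [List.eq_of_mem_replicate hrow]
      exact List.length_replicate
    · intro a b ha ha2 hb hb2
      rw [chGet_nonneg _ ha hb]
      have haN : a.toNat < (2 * c + 1).toNat := by omega
      have hbN : b.toNat < (2 * c + 1).toNat := by omega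
      rw [List.getD_eq_getElem _ [] (by simpa using haN), List.getElem_replicate,
        List.getD_eq_getElem _ 1 (by simpa using hbN), List.getElem_replicate]
      simp
  have hc1 : 0 ≤ c := hc
  have hc2 : c < 2 * c + 1 := by omega
  have := gridOK_set hG0 hc1 hc2 hc1 hc2
  refine ⟨?_, ?_, List.nodup_singleton _, ?_⟩
  · rw [hdia0]
    simpa using this
  · rw [hdia0, Finset.sum_singleton]
    ring
  · rw [hring0]
    simp

-- the A side computes the diamond sum
lemma solution_eq_sum {n : Int} (arr : List (List Int)) (hodd : n % 2 = 1) (hn : 1 ≤ n) :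
    solution n arr = ∑ p ∈ Dia (n / 2) (n / 2).toNat, pvArrGet arr p.1 p.2 := by
  have hc : 0 ≤ n / 2 := by omega
  have hfd : PySem.Int.floordiv n 2 = n / 2 :=
    PySem.Int.floordiv_eq_ediv_of_pos (by norm_num)
  have hrepl : n.toNat = (2 * (n / 2) + 1).toNat := by omega
  have hinit := init_levelInv (c := n / 2) arr hc
  have hfin := run_levels hc (n / 2).toNat 0 (by omega) hinit
  show (pvRun arr (PySem.Int.floordiv n 2).toNat
      (pvChSet (List.replicate n.toNat (List.replicate n.toNat (0 : Int)))
        (PySem.Int.floordiv n 2) (PySem.Int.floordiv n 2),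
       0 + pvArrGet arr (PySem.Int.floordiv n 2) (PySem.Int.floordiv n 2),
       [(PySem.Int.floordiv n 2, PySem.Int.floordiv n 2)])).2.1 = _
  rw [hfd, hrepl]
  exact hfin.2.1

lemma foldl_plus (g : Int → Int) (l : List Int) (t : Int) :
    l.foldl (fun acc i => acc + g i) t = t + (l.map g).sum := by
  induction l generalizing t with
  | nil => simp
  | cons a l ih =>
    simp only [List.foldl_cons, List.map_cons, List.sum_cons]
    rw [ih]
    ring

lemma sum_map_range (f : Nat → Int) (N : Nat) :
    ((List.range N).map f).sum = ∑ k ∈ Finset.range N, f k := by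
  induction N with
  | zero => simp
  | succ N ih => rw [List.range_succ, Finset.sum_range_succ, List.map_append, List.sum_append,
      ih, List.map_singleton, List.sum_singleton]

-- the B side computes the diamond sum
lemma solution_alt_eq_sum {n : Int} (arr : List (List Int)) (hodd : n % 2 = 1) (hn : 1 ≤ n) :
    solution_alt n arr = ∑ p ∈ Dia (n / 2) (n / 2).toNat, pvArrGet arr p.1 p.2 := by
  have hc : 0 ≤ n / 2 := by omega
  have hfd : PySem.Int.floordiv n 2 = n / 2 :=
    PySem.Int.floordiv_eq_ediv_of_pos (by norm_num)
  show (PySem.List.pyRange 0 n 1).foldl (fun total i =>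
      (PySem.List.pyRange
        (PySem.Int.floordiv n 2 - (PySem.Int.floordiv n 2 - |i - PySem.Int.floordiv n 2|))
        (PySem.Int.floordiv n 2 + (PySem.Int.floordiv n 2 - |i - PySem.Int.floordiv n 2|) + 1)
        1).foldl (fun total j => total + pvArrGet arr i j) total) 0 = _
  rw [hfd]
  have hrange : PySem.List.pyRange 0 n 1 = (List.range n.toNat).map (fun k : Nat => (k : Int)) := by
    rw [PySem.List.pyRange_one]
    simp only [sub_zero, zero_add]
  rw [hrange]
  have hin : ∀ t : Int, ∀ i : Nat, i < n.toNat →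
      (PySem.List.pyRange (n / 2 - (n / 2 - |(i : Int) - n / 2|))
        (n / 2 + (n / 2 - |(i : Int) - n / 2|) + 1) 1).foldl
        (fun total j => total + pvArrGet arr i j) t
      = t + ∑ j ∈ Finset.range n.toNat,
          (if |(i : Int) - n / 2| + |(j : Int) - n / 2| ≤ n / 2 then pvArrGet arr i j else 0) := by
    intro t i hi
    rw [PySem.List.pyRange_one, foldl_plus, List.map_map, sum_map_range, ← Finset.sum_filter]
    refine congrArg (t + ·) ?_
    refine Finset.sum_nbij' (i := fun k => ((i : Int) - n / 2).natAbs + k)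
      (j := fun j => j - ((i : Int) - n / 2).natAbs) ?_ ?_ ?_ ?_ ?_
    · intro k hk
      simp only [Finset.mem_range, Int.abs_eq_natAbs] at hk
      simp only [Finset.mem_filter, Finset.mem_range, Int.abs_eq_natAbs]
      omega
    · intro q hq
      simp only [Finset.mem_filter, Finset.mem_range, Int.abs_eq_natAbs] at hq
      simp only [Finset.mem_range, Int.abs_eq_natAbs]
      omega
    · intro k hk
      beta_reduce
      omega
    · intro q hq
      simp only [Finset.mem_filter, Finset.mem_range, Int.abs_eq_natAbs] at hq
      beta_reduce
      omega
    · intro k hk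
      simp only [Finset.mem_range, Int.abs_eq_natAbs] at hk
      simp only [Function.comp_apply]
      congr 1
      rw [Int.abs_eq_natAbs]
      push_cast
      ring
  have hout : ∀ t : Int, ((List.range n.toNat).map (fun k : Nat => (k : Int))).foldl
      (fun total i => total + ∑ j ∈ Finset.range n.toNat,
        (if |i - n / 2| + |(j : Int) - n / 2| ≤ n / 2 then pvArrGet arr i j else 0)) t
      = t + ∑ i ∈ Finset.range n.toNat, ∑ j ∈ Finset.range n.toNat,
          (if |(i : Int) - n / 2| + |(j : Int) - n / 2| ≤ n / 2 then pvArrGet arr i j else 0) := by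
    intro t
    rw [foldl_plus, List.map_map, sum_map_range]
    simp [Function.comp]
  calc ((List.range n.toNat).map (fun k : Nat => (k : Int))).foldl _ 0
      = 0 + ∑ i ∈ Finset.range n.toNat, ∑ j ∈ Finset.range n.toNat,
          (if |(i : Int) - n / 2| + |(j : Int) - n / 2| ≤ n / 2 then pvArrGet arr i j else 0) := by
        rw [← hout 0]
        apply PySem.List.foldl_congr_mem
        intro t x hx
        obtain ⟨k, hk, rfl⟩ := List.mem_map.mp hx
        exact hin t k (List.mem_range.mp hk)
    _ = ∑ p ∈ Dia (n / 2) (n / 2).toNat, pvArrGet arr p.1 p.2 := by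
        rw [zero_add, ← Finset.sum_product', ← Finset.sum_filter]
        refine Finset.sum_nbij' (i := fun p => ((p.1 : Int), (p.2 : Int)))
          (j := fun q => (q.1.toNat, q.2.toNat)) ?_ ?_ ?_ ?_ ?_
        · intro p hp
          simp only [Finset.mem_filter, Finset.mem_product, Finset.mem_range] at hp
          rw [mem_Dia]
          have := hp.2
          rw [← Int.natCast_natAbs, ← Int.natCast_natAbs] at this
          simp only [dstC]
          omega
        · intro q hq
          rw [mem_Dia] at hq
          simp only [Finset.mem_filter, Finset.mem_product, Finset.mem_range, dstC] at hq ⊢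
          refine ⟨⟨by omega, by omega⟩, ?_⟩
          rw [← Int.natCast_natAbs, ← Int.natCast_natAbs]
          omega
        · intro p hp
          simp only [Finset.mem_filter, Finset.mem_product, Finset.mem_range] at hp
          simp
        · intro q hq
          rw [mem_Dia] at hq
          simp only [dstC] at hq
          obtain ⟨a, b⟩ := q
          simp only [Prod.mk.injEq]
          constructor <;> omega
        · intro p hp
          rfl

-- ===== VERDICT (by name: the statement is the Claim_ definition above) =====
theorem solution_spec : Claim_equal_solution := by
  intro n arr _ hpre
  obtain ⟨hodd, hn, -⟩ := hpre
  show solution n arr = solution_alt n arr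
  rw [solution_eq_sum arr hodd hn, solution_alt_eq_sum arr hodd hn]
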